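-- pv_equiv track=rewrite | github.com/urb0123UW/CodingBat | xyz_there.py | xyz_there
-- ===== SOURCE A (Python) =====
-- def xyz_there(str):
--     #thinking of returning false if .xyz is in the string anywhere, but what if another xyz exists?
--
--     for i in range( len (str) - 2):
--         if str[i:i+3] == "xyz":
--
--             if( i > 0 and str[i-1] != "."):
--                 return True
--             elif i == 0:
--                 return True
--
--     return False
-- ===== SOURCE B (Python) =====
-- def xyz_there(str):
--     first, *rest = str.split('.')
--     return 'xyz' in first or any('xyz' in p[1:] for p in rest)
-- ===== Notes on version B (the rewrite author's own statement) =====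
-- stated objective: faster
-- what changed: Replaces A's index loop over 3-character slices with a back-reference to the previous character by splitting the string on the period character and reducing the task to substring membership per segment: the pattern anywhere in the first segment, or at offset >= 1 in a later segment (offset 0 of a later segment is exactly the dot-preceded case).
import Mathlib
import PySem

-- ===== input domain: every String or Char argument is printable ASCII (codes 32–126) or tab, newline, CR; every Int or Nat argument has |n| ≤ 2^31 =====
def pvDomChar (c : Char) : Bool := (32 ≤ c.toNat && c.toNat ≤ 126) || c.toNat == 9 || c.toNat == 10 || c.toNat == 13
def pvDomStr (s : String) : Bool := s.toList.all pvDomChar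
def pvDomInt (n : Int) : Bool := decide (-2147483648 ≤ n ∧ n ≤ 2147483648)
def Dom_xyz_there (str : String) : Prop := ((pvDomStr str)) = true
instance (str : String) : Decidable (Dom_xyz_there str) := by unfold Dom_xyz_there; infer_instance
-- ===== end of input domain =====

-- B replaces A's index loop over 3-character slices (with a str[i-1] back-reference) by
-- splitting on the period and testing substring membership per segment; measured faster
-- (constant factor: built-in split/substring search instead of a Python-level loop).


-- ===== PORT A =====
def xyz_there (str : String) : Bool :=
  (PySem.List.pyRange 0 (PySem.Str.len str - 2) 1).any fun i =>
    if PySem.Str.slice str (some i) (some (i + 3)) == "xyz" then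
      if decide (i > 0) && (PySem.Str.pyGet? str (i - 1) != some '.') then true
      else if i == 0 then true
      else false
    else false

-- ===== PORT B =====
def xyz_there_alt (str : String) : Bool :=
  match PySem.Str.split? str "." with
  | some (first :: rest) =>
      PySem.Str.isIn "xyz" first
        || rest.any fun p => PySem.Str.isIn "xyz" (PySem.Str.slice p (some 1) none)
  | _ => false   -- unreachable: split on a nonempty separator is a nonempty list

-- ===== PRECONDITION & SPEC =====
def Spec_xyz_there (str : String) (out : Bool) : Prop := out = xyz_there_alt str
instance (str : String) (out : Bool) : Decidable (Spec_xyz_there str out) := by unfold Spec_xyz_there; infer_instance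

-- ===== CLAIM (what is proved, stated in full; the proofs are below) =====
def Claim_equal_xyz_there : Prop := ∀ (str : String), Dom_xyz_there str → Spec_xyz_there str (xyz_there str)

-- ===== LEMMAS AND PROOFS =====

/-- The common characterisation: "xyz" at index k, not preceded by '.'. -/
def pvHit (cs : List Char) (k : Nat) : Prop :=
  cs[k]? = some 'x' ∧ cs[k+1]? = some 'y' ∧ cs[k+2]? = some 'z' ∧
    (k = 0 ∨ cs[k-1]? ≠ some '.')

theorem take3_eq_iff (cs : List Char) (k : Nat) :
    (cs.drop k).take 3 = ['x', 'y', 'z'] ↔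
      cs[k]? = some 'x' ∧ cs[k+1]? = some 'y' ∧ cs[k+2]? = some 'z' := by
  have h0 : cs[k]? = (cs.drop k)[0]? := by simp
  have h1 : cs[k+1]? = (cs.drop k)[1]? := by rw [List.getElem?_drop]
  have h2 : cs[k+2]? = (cs.drop k)[2]? := by rw [List.getElem?_drop]
  rw [h0, h1, h2]
  rcases hd : cs.drop k with _ | ⟨a, _ | ⟨b, _ | ⟨c, rest⟩⟩⟩ <;> simp

theorem xyz_there_iff (s : String) : xyz_there s = true ↔ ∃ k, pvHit s.toList k := by
  have hxyz : ("xyz" : String).toList = ['x', 'y', 'z'] := rfl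
  unfold xyz_there
  rw [List.any_eq_true]
  constructor
  · rintro ⟨i, hmem, hf⟩
    rw [PySem.List.mem_pyRange_one] at hmem
    obtain ⟨h0, h2⟩ := hmem
    refine ⟨i.toNat, ?_⟩
    by_cases hslice : PySem.Str.slice s (some i) (some (i + 3)) == "xyz"
    case neg => rw [if_neg hslice] at hf; simp at hf
    rw [if_pos hslice] at hf
    have hsl' : (PySem.Str.slice s (some i) (some (i + 3))).toList = ['x', 'y', 'z'] := by
      rw [(beq_iff_eq ..).mp hslice, hxyz]
    rw [PySem.Str.toList_slice, PySem.Chars.slice_eq_listSlice,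
        PySem.List.slice_toNat _ h0 (by omega)] at hsl'
    have h3 : (i + 3).toNat - i.toNat = 3 := by omega
    rw [h3, take3_eq_iff] at hsl'
    refine ⟨hsl'.1, hsl'.2.1, hsl'.2.2, ?_⟩
    by_cases hi : i = 0
    · left; omega
    · right
      by_cases hcond : (decide (i > 0) && (PySem.Str.pyGet? s (i - 1) != some '.')) = true
      · simp only [Bool.and_eq_true, bne_iff_ne] at hcond
        have hne := hcond.2
        rw [PySem.Str.pyGet?_eq, PySem.Chars.pyGet?_eq_listPyGet?] at hne
        have hcast : i - 1 = ((i.toNat - 1 : Nat) : Int) := by omega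
        rw [hcast, PySem.List.pyGet?_natCast] at hne
        exact hne
      · rw [if_neg hcond] at hf
        have : (i == 0) = false := by simpa using hi
        rw [this] at hf
        simp at hf
  · rintro ⟨k, hx, hy, hz, hprev⟩
    have hk2 : k + 2 < s.toList.length := (List.getElem?_eq_some_iff.mp hz).1
    refine ⟨(k : Int), ?_, ?_⟩
    · rw [PySem.List.mem_pyRange_one]
      refine ⟨by omega, ?_⟩
      simp only [PySem.Str.len_eq]
      omega
    · have hslice : (PySem.Str.slice s (some (k : Int)) (some ((k : Int) + 3)) == "xyz") = true := by
        rw [beq_iff_eq]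
        apply String.ext
        rw [PySem.Str.toList_slice, PySem.Chars.slice_eq_listSlice, hxyz]
        have h3 : ((k : Int) + 3) = ((k + 3 : Nat) : Int) := by push_cast; ring
        rw [h3, PySem.List.slice_natCast]
        have ht : k + 3 - k = 3 := by omega
        rw [ht, take3_eq_iff]
        exact ⟨hx, hy, hz⟩
      rw [if_pos hslice]
      by_cases hk0 : k = 0
      · subst hk0
        simp
      · rcases hprev with h0 | hne
        · omega
        have hcond : (decide ((k : Int) > 0) &&
            (PySem.Str.pyGet? s ((k : Int) - 1) != some '.')) = true := by
          simp only [Bool.and_eq_true, decide_eq_true_eq, bne_iff_ne]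
          refine ⟨by exact_mod_cast Nat.pos_of_ne_zero hk0, ?_⟩
          rw [PySem.Str.pyGet?_eq, PySem.Chars.pyGet?_eq_listPyGet?]
          have hcast : (k : Int) - 1 = ((k - 1 : Nat) : Int) := by omega
          rw [hcast, PySem.List.pyGet?_natCast]
          exact hne
        rw [if_pos hcond]

def pvXyz : List Char := ['x', 'y', 'z']

/-- Reference split on '.': (first segment, later segments). -/
def pvSplitDot : List Char → List Char × List (List Char)
  | [] => ([], [])
  | c :: rest =>
      let p := pvSplitDot rest
      if c = '.' then ([], p.1 :: p.2) else (c :: p.1, p.2)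

theorem splitOn_go_dot (l : List Char) : ∀ (fuel : Nat) (cur : List Char)
    (acc : List (List Char)), l.length < fuel →
    PySem.Chars.splitOn.go ['.'] fuel l cur acc
      = acc.reverse ++ ((cur.reverse ++ (pvSplitDot l).1) :: (pvSplitDot l).2) := by
  induction l with
  | nil =>
      intro fuel cur acc h
      rcases fuel with _ | fuel
      · omega
      · simp [PySem.Chars.splitOn.go, pvSplitDot]
  | cons c rest ih =>
      intro fuel cur acc h
      rcases fuel with _ | fuel
      · omega
      · by_cases hc : c = '.'
        · subst hc
          have : PySem.Chars.splitOn.go ['.'] (fuel+1) ('.'::rest) cur acc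
              = PySem.Chars.splitOn.go ['.'] fuel rest [] (cur.reverse :: acc) := by
            simp [PySem.Chars.splitOn.go, List.isPrefixOf]
          rw [this, ih fuel [] (cur.reverse :: acc) (by simp at h; omega)]
          simp [pvSplitDot]
        · have : PySem.Chars.splitOn.go ['.'] (fuel+1) (c::rest) cur acc
              = PySem.Chars.splitOn.go ['.'] fuel rest (c :: cur) acc := by
            simp [PySem.Chars.splitOn.go, List.isPrefixOf, Ne.symm hc]
          rw [this, ih fuel (c :: cur) acc (by simp at h; omega)]
          simp [pvSplitDot, hc]

theorem splitOn_dot (cs : List Char) :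
    PySem.Chars.splitOn cs ['.'] = (pvSplitDot cs).1 :: (pvSplitDot cs).2 := by
  unfold PySem.Chars.splitOn
  rw [splitOn_go_dot cs (cs.length + 1) [] [] (by omega)]
  simp

/-- B computed at the character-list level. -/
theorem xyz_there_alt_eq (s : String) :
    xyz_there_alt s
      = (PySem.Chars.isIn pvXyz (pvSplitDot s.toList).1
          || (pvSplitDot s.toList).2.any fun p => PySem.Chars.isIn pvXyz (p.drop 1)) := by
  have hsplit : PySem.Str.split? s "." =
      some (((pvSplitDot s.toList).1 :: (pvSplitDot s.toList).2).map String.ofList) := by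
    unfold PySem.Str.split? PySem.Chars.split?
    simp [splitOn_dot]
  unfold xyz_there_alt
  rw [hsplit]
  simp only [List.map_cons]
  simp only [PySem.Str.isIn_eq, List.any_map, PySem.Str.toList_slice,
    PySem.Chars.slice_eq_listSlice, PySem.List.slice_from _ (by norm_num : (0:Int) ≤ 1)]
  congr 1
  · simp [pvXyz]
  · refine List.any_congr rfl fun p => ?_
    simp [pvXyz]

/-- First segment of the split is the longest dot-free prefix; a dot-free pattern is a
prefix of the string iff it is a prefix of that segment. -/
theorem prefix_splitDot_iff (p : List Char) (hp : '.' ∉ p) :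
    ∀ l : List Char, (p <+: (pvSplitDot l).1 ↔ p <+: l) := by
  induction p with
  | nil => intro l; simp
  | cons a q ih =>
      intro l
      have ha : a ≠ '.' := by intro h; exact hp (h ▸ List.mem_cons_self)
      cases l with
      | nil =>
          simp [pvSplitDot]
      | cons c rest =>
          by_cases hc : c = '.'
          · subst hc
            simp only [pvSplitDot]
            constructor
            · intro h; exact absurd (List.prefix_nil.mp h) (by simp)
            · intro h
              obtain ⟨hac, -⟩ := List.cons_prefix_cons.mp h
              exact absurd hac ha
          · simp only [pvSplitDot, if_neg hc]
            rw [List.cons_prefix_cons, List.cons_prefix_cons,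
                ih (fun hm => hp (List.mem_cons_of_mem a hm)) rest]

theorem hit_zero_iff (cs : List Char) : pvHit cs 0 ↔ pvXyz <+: cs := by
  unfold pvHit
  have := take3_eq_iff cs 0
  simp only [List.drop_zero] at this
  rw [List.prefix_iff_eq_take]
  constructor
  · rintro ⟨hx, hy, hz, -⟩
    exact ((this.mpr ⟨hx, hy, hz⟩).symm : pvXyz = cs.take 3)
  · intro h
    have h3 := this.mp h.symm
    exact ⟨h3.1, h3.2.1, h3.2.2, Or.inl rfl⟩

theorem hit_shift (c : Char) (rest : List Char) (k : Nat) :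
    pvHit (c :: rest) (k+1) ↔ pvHit rest k ∧ (k = 0 → c ≠ '.') := by
  unfold pvHit
  rcases k with _ | j <;> simp_all <;> tauto

/-- The key equivalence: "some xyz not preceded by a dot" read off the dot-split. -/
theorem hit_split (cs : List Char) :
    ((∃ k, pvHit cs k)
        ↔ (pvXyz <:+: (pvSplitDot cs).1 ∨ ∃ p ∈ (pvSplitDot cs).2, pvXyz <:+: p.drop 1))
  ∧ ((∃ k, 1 ≤ k ∧ pvHit cs k)
        ↔ (pvXyz <:+: (pvSplitDot cs).1.drop 1
            ∨ ∃ p ∈ (pvSplitDot cs).2, pvXyz <:+: p.drop 1)) := by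
  induction cs with
  | nil =>
      constructor
      · simp only [pvSplitDot]
        constructor
        · rintro ⟨k, hx, -⟩; simp at hx
        · rintro (h | h) <;> simp [pvXyz] at h
      · simp only [pvSplitDot]
        constructor
        · rintro ⟨k, -, hx, -⟩; simp at hx
        · rintro (h | h) <;> simp [pvXyz] at h
  | cons c rest ih =>
      obtain ⟨ih1, ih2⟩ := ih
      have hsplitL : (∃ k, pvHit (c :: rest) k)
          ↔ pvHit (c :: rest) 0 ∨ ∃ k, 1 ≤ k ∧ pvHit (c :: rest) k := by
        constructor
        · rintro ⟨k, hk⟩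
          rcases k with _ | j
          · exact Or.inl hk
          · exact Or.inr ⟨j + 1, by omega, hk⟩
        · rintro (h | ⟨k, -, hk⟩)
          · exact ⟨0, h⟩
          · exact ⟨k, hk⟩
      by_cases hc : c = '.'
      · subst hc
        have hs : pvSplitDot ('.' :: rest)
            = ([], (pvSplitDot rest).1 :: (pvSplitDot rest).2) := by
          simp [pvSplitDot]
        have h0 : ¬ pvHit ('.' :: rest) 0 := by
          rw [hit_zero_iff]
          intro h
          obtain ⟨h1, -⟩ := List.cons_prefix_cons.mp h
          simp at h1
        have hge1 : (∃ k, 1 ≤ k ∧ pvHit ('.' :: rest) k) ↔ ∃ k, 1 ≤ k ∧ pvHit rest k := by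
          constructor
          · rintro ⟨k, hk1, hk⟩
            rcases k with _ | j
            · omega
            · rw [hit_shift] at hk
              rcases j with _ | i
              · exact absurd rfl (hk.2 rfl)
              · exact ⟨i + 1, by omega, hk.1⟩
          · rintro ⟨k, hk1, hk⟩
            exact ⟨k + 1, by omega, (hit_shift _ _ _).mpr ⟨hk, by omega⟩⟩
        have hmain : (∃ k, pvHit ('.' :: rest) k)
            ↔ (pvXyz <:+: (pvSplitDot rest).1.drop 1
                ∨ ∃ p ∈ (pvSplitDot rest).2, pvXyz <:+: p.drop 1) := by
          rw [hsplitL, ← ih2, ← hge1]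
          tauto
        constructor
        · rw [hmain, hs]
          constructor
          · intro h
            right
            rcases h with h | ⟨p, hp, h⟩
            · exact ⟨(pvSplitDot rest).1, by simp, h⟩
            · exact ⟨p, by simp [hp], h⟩
          · rintro (h | ⟨p, hp, h⟩)
            · exact absurd (List.eq_nil_of_infix_nil h) (by simp [pvXyz])
            · rcases List.mem_cons.mp hp with rfl | hp'
              · exact Or.inl h
              · exact Or.inr ⟨p, hp', h⟩
        · rw [hge1, ih2, hs]
          simp only [List.drop_nil]
          constructor
          · intro h
            right
            rcases h with h | ⟨p, hp, h⟩
            · exact ⟨(pvSplitDot rest).1, by simp, h⟩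
            · exact ⟨p, by simp [hp], h⟩
          · rintro (h | ⟨p, hp, h⟩)
            · exact absurd (List.eq_nil_of_infix_nil h) (by simp [pvXyz])
            · rcases List.mem_cons.mp hp with rfl | hp'
              · exact Or.inl h
              · exact Or.inr ⟨p, hp', h⟩
      · have hs : pvSplitDot (c :: rest)
            = (c :: (pvSplitDot rest).1, (pvSplitDot rest).2) := by
          simp [pvSplitDot, hc]
        have hge1 : (∃ k, 1 ≤ k ∧ pvHit (c :: rest) k) ↔ ∃ k, pvHit rest k := by
          constructor
          · rintro ⟨k, hk1, hk⟩
            rcases k with _ | j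
            · omega
            · exact ⟨j, ((hit_shift _ _ _).mp hk).1⟩
          · rintro ⟨k, hk⟩
            exact ⟨k + 1, by omega, (hit_shift _ _ _).mpr ⟨hk, fun _ => hc⟩⟩
        have hS2 : (∃ k, 1 ≤ k ∧ pvHit (c :: rest) k)
            ↔ (pvXyz <:+: (pvSplitDot (c :: rest)).1.drop 1
                ∨ ∃ p ∈ (pvSplitDot (c :: rest)).2, pvXyz <:+: p.drop 1) := by
          rw [hge1, ih1, hs]
          simp
        refine ⟨?_, hS2⟩
        rw [hsplitL, hit_zero_iff, hS2, hs]
        simp only [List.drop_succ_cons, List.drop_zero]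
        rw [List.infix_cons_iff]
        have hpfx : pvXyz <+: (c :: rest) ↔ pvXyz <+: c :: (pvSplitDot rest).1 := by
          have h := prefix_splitDot_iff pvXyz (by simp [pvXyz]) (c :: rest)
          rw [hs] at h
          exact h.symm
        rw [hpfx]
        exact or_assoc.symm

-- ===== VERDICT (by name: the statement is the Claim_ definition above) =====
theorem xyz_there_spec : Claim_equal_xyz_there := by
  intro s _
  unfold Spec_xyz_there
  have ha := xyz_there_iff s
  have hb' : xyz_there_alt s = true ↔ ∃ k, pvHit s.toList k := by
    rw [xyz_there_alt_eq]
    simp only [Bool.or_eq_true, List.any_eq_true, PySem.Chars.isIn_iff_infix, List.drop_one]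
    have h := (hit_split s.toList).1
    simp only [List.drop_one] at h
    exact h.symm
  cases h1 : xyz_there s <;> cases h2 : xyz_there_alt s <;> simp_all
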